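-- pv_equiv track=rewrite | github.com/joeyschmidt97/fusion_research | ARCHIVE/GENE_code_V4/simulation_data/criteria_checker/criteria_parser_V4.py | extract_units_criteria
-- ===== SOURCE A (Python) =====
-- def extract_units_criteria(input_criteria:str):
--     """
--     Extracts the units and criteria from a given input string.
--     Parameters:
--         - input_criteria (str): The input string containing criteria and possibly units.
--         - Exampe input_criteria:
--             - 'var(unit)'
--             - 'var(unit)<0.4'
--             - 'var(unit)<0.4'
--     Returns:
--         - tuple: A tuple containing the extracted criteria and units.
--     """
--     # Remove spaces from the input criteria
--     input_criteria = input_criteria.replace(' ', '')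
--
--     # Error handling
--     #------------------------------------------------------------
--     if ("(" in input_criteria) or (")" in input_criteria):
--
--         parenthesis_structure = ''.join(char for char in input_criteria if char in '()')
--         parenthesis_mismatch = (parenthesis_structure != '()')
--
--         if not parenthesis_mismatch:
--             units = ''.join(input_criteria.split('(')[-1].rsplit(')')[0])
--             units_empty = (units=='')
--
--         # TODO: add error checking for cases like 'time(s)dsa'?
--
--         if parenthesis_mismatch or units_empty:
--             raise ValueError(f"Please ensure input '{input_criteria}' is written with parentheses as 'variable_name(units)'")
--     #------------------------------------------------------------
--
--     # Check if input criteria contains parenthesis which indicates units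
--     if ("(" or ")") in input_criteria:
--         # Split the string into the criteria part and the units part
--         criteria_L, units_R = input_criteria.split("(")
--         units, criteria_R = units_R.split(")")
--         criteria = criteria_L + criteria_R
--     else:
--         criteria = input_criteria
--         units = None
--
--     return criteria, units
-- ===== SOURCE B (Python) =====
-- def extract_units_criteria(input_criteria: str):
--     s = input_criteria.replace(' ', '')
--     opens = 0
--     closes = 0
--     crit = []
--     units = []
--     inside = False
--     ok = True
--     for ch in s:
--         if ch == '(':
--             if closes > 0:
--                 ok = False
--             opens += 1
--             inside = True
--         elif ch == ')':
--             if opens == 0: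
--                 ok = False
--             closes += 1
--             inside = False
--         elif inside:
--             units.append(ch)
--         else:
--             crit.append(ch)
--     if opens == 0 and closes == 0:
--         return s, None
--     if not (ok and opens == 1 and closes == 1 and units):
--         raise ValueError(f"Please ensure input '{s}' is written with parentheses as 'variable_name(units)'")
--     return ''.join(crit), ''.join(units)
-- ===== Notes on version B (the rewrite author's own statement) =====
-- stated objective: alternative
-- what changed: A filters out the parenthesis structure, joins, and splits/rsplits the string around '(' and ')'; B makes a single character scan with open/close counters, an inside-parentheses flag and two buffers, routing each character to the criteria or units buffer.
import Mathlib
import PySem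

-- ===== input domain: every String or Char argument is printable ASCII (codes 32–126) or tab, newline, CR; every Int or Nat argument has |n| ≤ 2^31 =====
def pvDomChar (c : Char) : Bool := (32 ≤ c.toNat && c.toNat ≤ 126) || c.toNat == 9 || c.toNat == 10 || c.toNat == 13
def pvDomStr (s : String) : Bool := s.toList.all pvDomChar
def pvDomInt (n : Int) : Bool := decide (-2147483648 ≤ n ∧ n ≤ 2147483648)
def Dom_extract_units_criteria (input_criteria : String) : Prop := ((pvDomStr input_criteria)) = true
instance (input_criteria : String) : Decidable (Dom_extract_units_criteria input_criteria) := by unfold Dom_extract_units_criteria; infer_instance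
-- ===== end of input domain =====

-- B replaces A's filter/split/rsplit passes by a single character scan with two buffers
-- and parenthesis counters (objective: alternative decomposition, same behaviour incl. raises).

-- ===== PORT A =====
-- Literal port of A. Where Python raises ValueError the port returns ("", none); Pre_
-- excludes exactly those inputs. `rsplit(')')` without maxsplit splits at every ')'
-- exactly like `split(')')`, so both are ported as splitOn.
def extract_units_criteria (input_criteria : String) : String × Option String :=
  let t := (PySem.Str.replace input_criteria " " "").toList
  if PySem.Chars.isIn ['('] t || PySem.Chars.isIn [')'] t then
    -- parenthesis_structure = ''.join(char for char in input_criteria if char in '()')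
    let ps := t.filter (fun c => PySem.Chars.isIn [c] ['(', ')'])
    if ps ≠ ['(', ')'] then ("", none)  -- parenthesis_mismatch → raise ValueError
    else
      -- units = ''.join(input_criteria.split('(')[-1].rsplit(')')[0])
      let units :=
        (PySem.List.pyGet?
          (PySem.Chars.splitOn
            ((PySem.List.pyGet? (PySem.Chars.splitOn t ['(']) (-1)).getD []) [')']) 0).getD []
      if units = [] then ("", none)  -- units_empty → raise ValueError
      else
        -- if ("(" or ")") in input_criteria:  ⇔  '(' in input_criteria, true here
        match PySem.Chars.splitOn t ['('] with
        | [critL, unitsR] =>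
          match PySem.Chars.splitOn unitsR [')'] with
          | [u, critR] => (String.ofList (critL ++ critR), some (String.ofList u))
          | _ => ("", none)  -- unpacking ValueError (unreachable under Pre_)
        | _ => ("", none)    -- unpacking ValueError (unreachable under Pre_)
  else
    -- no parenthesis at all: the main `if '(' in input_criteria` is false
    (String.ofList t, none)

-- ===== PORT B =====
-- one step of B's scan: state = (opens, closes, crit, units, inside, ok)
def pvStepB (st : Nat × Nat × List Char × List Char × Bool × Bool) (ch : Char) :
    Nat × Nat × List Char × List Char × Bool × Bool :=
  match st with
  | (o, c, cr, un, ins, ok) =>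
    if ch = '(' then (o + 1, c, cr, un, true, ok && (c == 0))
    else if ch = ')' then (o, c + 1, cr, un, false, ok && !(o == 0))
    else if ins then (o, c, cr, un ++ [ch], ins, ok)
    else (o, c, cr ++ [ch], un, ins, ok)

def extract_units_criteria_alt (input_criteria : String) : String × Option String :=
  let t := (PySem.Str.replace input_criteria " " "").toList
  match t.foldl pvStepB (0, 0, [], [], false, true) with
  | (o, c, cr, un, _ins, ok) =>
    if o = 0 ∧ c = 0 then (String.ofList t, none)
    else if ok = true ∧ o = 1 ∧ c = 1 ∧ un ≠ [] then (String.ofList cr, some (String.ofList un))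
    else ("", none)  -- raise ValueError (same inputs as A; outside Pre_)

-- ===== PRECONDITION & SPEC =====
-- Pre_ excludes exactly the inputs on which A raises ValueError: after removing spaces,
-- either no parenthesis occurs, or the parentheses are exactly one '(' followed by one ')'
-- with at least one character between them.
def Pre_extract_units_criteria (input_criteria : String) : Prop :=
  let t := (PySem.Str.replace input_criteria " " "").toList
  t.filter (fun c => c == '(' || c == ')') = [] ∨
    (t.filter (fun c => c == '(' || c == ')') = ['(', ')'] ∧
      t.idxOf ')' ≠ t.idxOf '(' + 1)
instance (input_criteria : String) : Decidable (Pre_extract_units_criteria input_criteria) := by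
  unfold Pre_extract_units_criteria; infer_instance

def pvWitness_extract_units_criteria : String := "var(unit)<0.4"

def Spec_extract_units_criteria (input_criteria : String) (out : String × Option String) : Prop :=
  out = extract_units_criteria_alt input_criteria
instance (input_criteria : String) (out : String × Option String) :
    Decidable (Spec_extract_units_criteria input_criteria out) := by
  unfold Spec_extract_units_criteria; infer_instance

-- ===== CLAIM (what is proved, stated in full; the proofs are below) =====
def Claim_equal_extract_units_criteria : Prop :=
  ∀ (input_criteria : String), Dom_extract_units_criteria input_criteria →
    Pre_extract_units_criteria input_criteria →
      Spec_extract_units_criteria input_criteria (extract_units_criteria input_criteria)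

-- ===== LEMMAS AND PROOFS =====

lemma pv_singleton_infix (a : Char) (l : List Char) : [a] <:+: l ↔ a ∈ l := by
  constructor
  · rintro ⟨s, t, rfl⟩; simp
  · intro h
    obtain ⟨s, t, rfl⟩ := List.append_of_mem h
    exact ⟨s, t, by simp⟩

lemma pv_isIn_singleton (c : Char) (l : List Char) :
    PySem.Chars.isIn [c] l = l.contains c := by
  by_cases h : c ∈ l
  · rw [(PySem.Chars.isIn_iff_infix [c] l).mpr ((pv_singleton_infix c l).mpr h)]
    simp [h]
  · rw [(PySem.Chars.isIn_eq_false_iff [c] l).mpr (fun hi => h ((pv_singleton_infix c l).mp hi))]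
    simp [h]

-- A's filter predicate equals Pre_'s
lemma pv_filter_pred (t : List Char) :
    t.filter (fun c => PySem.Chars.isIn [c] ['(', ')']) =
    t.filter (fun c => c == '(' || c == ')') := by
  apply List.filter_congr
  intro c _
  rw [pv_isIn_singleton]
  by_cases h1 : c = '('
  · simp [h1]
  · by_cases h2 : c = ')' <;> simp [h1, h2]

-- splitOn.go with a single-char separator absent from the input
lemma pv_splitOn_go_nosep (x : Char) :
    ∀ (l : List Char), x ∉ l → ∀ (fuel : Nat), l.length < fuel →
      ∀ (cur : List Char) (acc : List (List Char)),
        PySem.Chars.splitOn.go [x] fuel l cur acc = acc.reverse ++ [cur.reverse ++ l] := by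
  intro l
  induction l with
  | nil =>
    intro _ fuel hf cur acc
    match fuel, hf with
    | (f+1), _ =>
      rw [PySem.Chars.splitOn.go.eq_def]
      simp
  | cons c rest ih =>
    intro hx fuel hf cur acc
    match fuel, hf with
    | (f+1), hf =>
      have hc : ¬ (x = c) := fun h => hx (h ▸ List.mem_cons_self)
      have hx' : x ∉ rest := fun h => hx (List.mem_cons_of_mem _ h)
      have : PySem.Chars.splitOn.go [x] (f+1) (c :: rest) cur acc =
          PySem.Chars.splitOn.go [x] f rest (c :: cur) acc := by
        rw [PySem.Chars.splitOn.go.eq_def]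
        simp [List.isPrefixOf, hc]
      rw [this, ih hx' f (by simpa using hf) (c :: cur) acc]
      simp

lemma pv_splitOn_go_once (x : Char) :
    ∀ (a : List Char), x ∉ a → ∀ (b : List Char), x ∉ b → ∀ (fuel : Nat),
      (a ++ x :: b).length < fuel → ∀ (cur : List Char) (acc : List (List Char)),
        PySem.Chars.splitOn.go [x] fuel (a ++ x :: b) cur acc =
          acc.reverse ++ [cur.reverse ++ a, b] := by
  intro a
  induction a with
  | nil =>
    intro _ b hb fuel hf cur acc
    match fuel, hf with
    | (f+1), hf =>
      have : PySem.Chars.splitOn.go [x] (f+1) ([] ++ x :: b) cur acc =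
          PySem.Chars.splitOn.go [x] f b [] (cur.reverse :: acc) := by
        rw [PySem.Chars.splitOn.go.eq_def]
        simp [List.isPrefixOf]
      rw [this, pv_splitOn_go_nosep x b hb f (by simpa using hf) [] (cur.reverse :: acc)]
      simp
  | cons c a' ih =>
    intro ha b hb fuel hf cur acc
    match fuel, hf with
    | (f+1), hf =>
      have hc : ¬ (x = c) := fun h => ha (h ▸ List.mem_cons_self)
      have ha' : x ∉ a' := fun h => ha (List.mem_cons_of_mem _ h)
      have : PySem.Chars.splitOn.go [x] (f+1) ((c :: a') ++ x :: b) cur acc =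
          PySem.Chars.splitOn.go [x] f (a' ++ x :: b) (c :: cur) acc := by
        rw [PySem.Chars.splitOn.go.eq_def]
        simp [List.isPrefixOf, hc]
      rw [this, ih ha' b hb f (by simpa using hf) (c :: cur) acc]
      simp

lemma pv_splitOn_once (x : Char) (a b : List Char) (ha : x ∉ a) (hb : x ∉ b) :
    PySem.Chars.splitOn (a ++ x :: b) [x] = [a, b] := by
  have := pv_splitOn_go_once x a ha b hb ((a ++ x :: b).length + 1) (by omega) [] []
  simpa [PySem.Chars.splitOn] using this

-- first index of an element after a prefix not containing it
lemma pv_idxOf_append (x : Char) (a r : List Char) (ha : x ∉ a) :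
    (a ++ x :: r).idxOf x = a.length := by
  induction a with
  | nil => simp
  | cons c a' ih =>
    have hc : ¬ (c = x) := fun h => ha (h ▸ List.mem_cons_self)
    have ha' : x ∉ a' := fun h => ha (List.mem_cons_of_mem _ h)
    simp [hc, ih ha']

-- B's fold over a stretch without parentheses, outside parentheses (inside = false)
lemma pv_foldB_crit (t : List Char) (h : ∀ ch ∈ t, ch ≠ '(' ∧ ch ≠ ')') :
    ∀ (o c : Nat) (cr un : List Char) (ok : Bool),
      t.foldl pvStepB (o, c, cr, un, false, ok) = (o, c, cr ++ t, un, false, ok) := by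
  induction t with
  | nil => intro o c cr un ok; simp
  | cons ch t ih =>
    intro o c cr un ok
    obtain ⟨h1, h2⟩ := h ch List.mem_cons_self
    have h' : ∀ x ∈ t, x ≠ '(' ∧ x ≠ ')' := fun x hx => h x (List.mem_cons_of_mem _ hx)
    simp [pvStepB, h1, h2, ih h']

-- B's fold over a stretch without parentheses, inside parentheses (inside = true)
lemma pv_foldB_units (t : List Char) (h : ∀ ch ∈ t, ch ≠ '(' ∧ ch ≠ ')') :
    ∀ (o c : Nat) (cr un : List Char) (ok : Bool),
      t.foldl pvStepB (o, c, cr, un, true, ok) = (o, c, cr, un ++ t, true, ok) := by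
  induction t with
  | nil => intro o c cr un ok; simp
  | cons ch t ih =>
    intro o c cr un ok
    obtain ⟨h1, h2⟩ := h ch List.mem_cons_self
    have h' : ∀ x ∈ t, x ≠ '(' ∧ x ≠ ')' := fun x hx => h x (List.mem_cons_of_mem _ hx)
    simp [pvStepB, h1, h2, ih h']

lemma pv_noparen_of_filter_nil (t : List Char)
    (h : t.filter (fun c => c == '(' || c == ')') = []) :
    ∀ c ∈ t, c ≠ '(' ∧ c ≠ ')' := by
  intro c hc
  have := List.filter_eq_nil_iff.mp h c hc
  simp at this
  exact this

-- main agreement on the "no parenthesis" side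
lemma pv_case_nil (t : List Char)
    (h : ∀ c ∈ t, c ≠ '(' ∧ c ≠ ')') :
    ('(' ∉ t) ∧ (')' ∉ t) :=
  ⟨fun hm => (h _ hm).1 rfl, fun hm => (h _ hm).2 rfl⟩

-- ===== VERDICT (by name: the statement is the Claim_ definition above) =====
theorem extract_units_criteria_spec : Claim_equal_extract_units_criteria := by
  intro s _hdom hpre
  show extract_units_criteria s = extract_units_criteria_alt s
  unfold extract_units_criteria extract_units_criteria_alt
  unfold Pre_extract_units_criteria at hpre
  dsimp only at hpre ⊢
  generalize (PySem.Str.replace s " " "").toList = t at hpre ⊢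
  rcases hpre with hnil | ⟨hps, hidx⟩
  · -- no parenthesis at all
    have hnp := pv_noparen_of_filter_nil t hnil
    obtain ⟨hL, hR⟩ := pv_case_nil t hnp
    have hiL : PySem.Chars.isIn ['('] t = false := by
      rw [pv_isIn_singleton]; simpa using hL
    have hiR : PySem.Chars.isIn [')'] t = false := by
      rw [pv_isIn_singleton]; simpa using hR
    rw [pv_foldB_crit t hnp]
    simp [hiL, hiR]
  · -- exactly one '(' then one ')', nonempty units
    obtain ⟨a, r, rfl, hA, -, hr⟩ := List.filter_eq_cons_iff.mp hps
    obtain ⟨m, b, rfl, hM, -, hb⟩ := List.filter_eq_cons_iff.mp hr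
    have hB := List.filter_eq_nil_iff.mp hb
    -- paren-freeness of the three stretches
    have hAnp : ∀ c ∈ a, c ≠ '(' ∧ c ≠ ')' := by
      intro c hc; have := hA c hc; simp at this; exact this
    have hMnp : ∀ c ∈ m, c ≠ '(' ∧ c ≠ ')' := by
      intro c hc; have := hM c hc; simp at this; exact this
    have hBnp : ∀ c ∈ b, c ≠ '(' ∧ c ≠ ')' := by
      intro c hc; have := hB c hc; simp at this; exact this
    have haL : '(' ∉ a := fun h => (hAnp _ h).1 rfl
    have haR : ')' ∉ a := fun h => (hAnp _ h).2 rfl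
    have hmL : '(' ∉ m := fun h => (hMnp _ h).1 rfl
    have hmR : ')' ∉ m := fun h => (hMnp _ h).2 rfl
    have hbL : '(' ∉ b := fun h => (hBnp _ h).1 rfl
    have hbR : ')' ∉ b := fun h => (hBnp _ h).2 rfl
    -- m nonempty from the index condition
    have hidx1 : (a ++ '(' :: (m ++ ')' :: b)).idxOf '(' = a.length :=
      pv_idxOf_append '(' a _ haL
    have hre : a ++ '(' :: (m ++ ')' :: b) = (a ++ '(' :: m) ++ ')' :: b := by simp
    have hidx2 : (a ++ '(' :: (m ++ ')' :: b)).idxOf ')' = a.length + 1 + m.length := by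
      rw [hre, pv_idxOf_append ')' (a ++ '(' :: m) b (by
        intro h
        rcases List.mem_append.mp h with h | h
        · exact haR h
        · rcases List.mem_cons.mp h with h | h
          · exact absurd h (by decide)
          · exact hmR h)]
      simp; omega
    have hm : m ≠ [] := by
      intro hmeq
      apply hidx
      rw [hidx1, hidx2, hmeq]
      simp
    -- evaluate A
    have hiL : PySem.Chars.isIn ['('] (a ++ '(' :: (m ++ ')' :: b)) = true := by
      rw [pv_isIn_singleton]; simp
    have hsplit1 : PySem.Chars.splitOn (a ++ '(' :: (m ++ ')' :: b)) ['('] =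
        [a, m ++ ')' :: b] := by
      apply pv_splitOn_once '(' a (m ++ ')' :: b) haL
      intro h
      rcases List.mem_append.mp h with h | h
      · exact hmL h
      · rcases List.mem_cons.mp h with h | h
        · exact absurd h (by decide)
        · exact hbL h
    have hsplit2 : PySem.Chars.splitOn (m ++ ')' :: b) [')'] = [m, b] :=
      pv_splitOn_once ')' m b hmR hbR
    have hps' : (a ++ '(' :: (m ++ ')' :: b)).filter
        (fun c => PySem.Chars.isIn [c] ['(', ')']) = ['(', ')'] := by
      rw [pv_filter_pred]; exact hps
    -- evaluate B
    have hfold : (a ++ '(' :: (m ++ ')' :: b)).foldl pvStepB (0, 0, [], [], false, true) =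
        (1, 1, a ++ b, m, false, true) := by
      rw [show a ++ '(' :: (m ++ ')' :: b) = (a ++ ['(']) ++ ((m ++ [')']) ++ b) from by simp]
      rw [List.foldl_append, List.foldl_append, List.foldl_append, List.foldl_append,
          pv_foldB_crit a hAnp]
      simp only [List.nil_append]
      rw [show List.foldl pvStepB ((0 : Nat), (0 : Nat), a, ([] : List Char), false, true) ['('] =
            (1, 0, a, [], true, true) from by simp [pvStepB]]
      rw [pv_foldB_units m hMnp]
      simp only [List.nil_append]
      rw [show List.foldl pvStepB ((1 : Nat), (0 : Nat), a, m, true, true) [')'] =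
            (1, 1, a, m, false, true) from by simp [pvStepB]]
      rw [pv_foldB_crit b hBnp]
    rw [hfold, hiL, hps']
    simp [PySem.List.pyGet?, PySem.List.pyIdx?, hsplit1, hsplit2, hm]
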